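-- pv_equiv track=rewrite | github.com/HappynessI/verl-for-AgentGym | examples/sglang_multiturn/my_exp/legacy/entropy_analysis/entropy_offline_batched.py | reversible_normalize
-- ===== SOURCE A (Python) =====
-- def reversible_normalize(s: str):
--     """可逆规范化，返回 (normalized_s, norm_spans)"""
--     normalized_chars = []
--     norm_spans = []
--     buffer = []
--     buffer_spans = []
--
--     i = 0
--     while i < len(s):
--         c = s[i]
--         if c == '\r' and i + 1 < len(s) and s[i + 1] == '\n':
--             while buffer and (buffer[-1] == ' ' or buffer[-1] == '\t'):
--                 buffer.pop(); buffer_spans.pop()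
--             normalized_chars.extend(buffer); norm_spans.extend(buffer_spans)
--             normalized_chars.append('\n'); norm_spans.append((i, i + 2))
--             buffer.clear(); buffer_spans.clear()
--             i += 2; continue
--         if c == '\r':
--             while buffer and (buffer[-1] == ' ' or buffer[-1] == '\t'):
--                 buffer.pop(); buffer_spans.pop()
--             normalized_chars.extend(buffer); norm_spans.extend(buffer_spans)
--             normalized_chars.append('\n'); norm_spans.append((i, i + 1))
--             buffer.clear(); buffer_spans.clear()
--             i += 1; continue
--         if c == '\n':
--             while buffer and (buffer[-1] == ' ' or buffer[-1] == '\t'):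
--                 buffer.pop(); buffer_spans.pop()
--             normalized_chars.extend(buffer); norm_spans.extend(buffer_spans)
--             normalized_chars.append('\n'); norm_spans.append((i, i + 1))
--             buffer.clear(); buffer_spans.clear()
--             i += 1; continue
--         if c == ' ' or c == '\t':
--             buffer.append(c); buffer_spans.append((i, i + 1))
--         else:
--             if buffer:
--                 normalized_chars.append(' '); norm_spans.append(buffer_spans[-1])
--                 buffer.clear(); buffer_spans.clear()
--             normalized_chars.append(c); norm_spans.append((i, i + 1))
--         i += 1
--
--     if buffer:
--         normalized_chars.append(' '); norm_spans.append(buffer_spans[-1])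
--     return ''.join(normalized_chars), norm_spans
-- ===== SOURCE B (Python) =====
-- def reversible_normalize(s: str):
--     """可逆规范化，返回 (normalized_s, norm_spans)"""
--     # Pass 1: tokenize. Token = (char_or_None, span); None marks a whitespace char,
--     # '\n' tokens come from '\r\n', '\r' or '\n'.
--     toks = []
--     i = 0
--     n = len(s)
--     while i < n:
--         c = s[i]
--         if c == '\r':
--             j = i + 2 if i + 1 < n and s[i + 1] == '\n' else i + 1
--             toks.append(('\n', (i, j)))
--             i = j
--         elif c == '\n':
--             toks.append(('\n', (i, i + 1)))
--             i += 1
--         elif c == ' ' or c == '\t':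
--             toks.append((None, (i, i + 1)))
--             i += 1
--         else:
--             toks.append((c, (i, i + 1)))
--             i += 1
--     # Pass 2: a whitespace token is kept (as one ' ') only when the NEXT token is an
--     # ordinary character or there is no next token; otherwise it is dropped.
--     out = []
--     spans = []
--     for k, (t, sp) in enumerate(toks):
--         if t is not None:
--             out.append(t)
--             spans.append(sp)
--         else:
--             nxt = toks[k + 1][0] if k + 1 < len(toks) else None
--             if k + 1 == len(toks) or (nxt is not None and nxt != '\n'):
--                 out.append(' ')
--                 spans.append(sp)
--     return ''.join(out), spans
-- ===== Notes on version B (the rewrite author's own statement) =====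
-- stated objective: alternative
-- what changed: Replaces A's single pass with a mutable whitespace buffer, parallel span list, inner pop-while loops and extends by two passes: tokenize into (char-or-whitespace-marker, span) tokens, then a lookahead pass that keeps a whitespace token only when the next token is an ordinary character or there is none.
import Mathlib
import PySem

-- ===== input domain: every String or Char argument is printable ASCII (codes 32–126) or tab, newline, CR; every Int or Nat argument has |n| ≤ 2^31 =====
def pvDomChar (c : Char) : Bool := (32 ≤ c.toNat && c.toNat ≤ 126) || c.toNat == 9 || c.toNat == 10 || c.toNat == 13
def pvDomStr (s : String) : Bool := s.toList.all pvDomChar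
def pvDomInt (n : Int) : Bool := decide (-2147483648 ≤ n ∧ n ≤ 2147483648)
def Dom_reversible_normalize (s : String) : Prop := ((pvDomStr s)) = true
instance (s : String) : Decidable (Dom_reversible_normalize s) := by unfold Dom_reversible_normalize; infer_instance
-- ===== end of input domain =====

-- B replaces A's one-pass buffer/pop-loop machinery by two passes: tokenize into
-- (char-or-whitespace-marker, span) tokens, then keep a whitespace token only when the
-- next token is an ordinary character or there is none (objective: simpler).

-- ===== PORT A =====
-- A's inner 'while buffer and buffer[-1] in (' ','\t'): pop both lists' loop.
def pvPopA (b : List Char) (bs : List (Int × Int)) : List Char × List (Int × Int) :=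
  if _h : b.getLast? = some ' ' ∨ b.getLast? = some '\t' then
    pvPopA b.dropLast bs.dropLast
  else (b, bs)
termination_by b.length
decreasing_by
  have hb : b ≠ [] := by
    intro he; subst he; simp at _h
  cases b with
  | nil => exact absurd rfl hb
  | cons x xs => simp [List.length_dropLast]

-- A's main while loop; state = (buffer, buffer_spans, normalized_chars, norm_spans).
-- (bs.getLastD (0,0): Python's buffer_spans[-1]; buffer_spans is nonempty there since buffer is.)
def pvGoA (cs : List Char) (i : Int) (b : List Char) (bs : List (Int × Int))
    (accC : List Char) (accS : List (Int × Int)) : List Char × List (Int × Int) :=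
  match cs with
  | [] => if b.isEmpty then (accC, accS) else (accC ++ [' '], accS ++ [bs.getLastD (0, 0)])
  | c :: rest =>
      if c = '\r' ∧ rest.head? = some '\n' then
        pvGoA rest.tail (i + 2) [] []
          (accC ++ (pvPopA b bs).1 ++ ['\n']) (accS ++ (pvPopA b bs).2 ++ [(i, i + 2)])
      else if c = '\r' ∨ c = '\n' then
        -- lone '\r' and '\n' branches of A are textually identical
        pvGoA rest (i + 1) [] []
          (accC ++ (pvPopA b bs).1 ++ ['\n']) (accS ++ (pvPopA b bs).2 ++ [(i, i + 1)])
      else if c = ' ' ∨ c = '\t' then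
        pvGoA rest (i + 1) (b ++ [c]) (bs ++ [(i, i + 1)]) accC accS
      else
        pvGoA rest (i + 1) [] []
          ((if b.isEmpty then accC else accC ++ [' ']) ++ [c])
          ((if b.isEmpty then accS else accS ++ [bs.getLastD (0, 0)]) ++ [(i, i + 1)])
termination_by cs.length
decreasing_by all_goals simp [List.length_tail]

def reversible_normalize (s : String) : String × (List (Int × Int)) :=
  let r := pvGoA s.toList 0 [] [] [] []
  (String.ofList r.1, r.2)

-- ===== PORT B =====
-- Pass 1: tokenizer. A token is (none, span) for a whitespace char, (some '\n', span)
-- for a newline ('\r\n', '\r' or '\n'), (some c, span) for an ordinary character.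
def pvTokB (cs : List Char) (i : Int) : List (Option Char × Int × Int) :=
  match cs with
  | [] => []
  | c :: rest =>
      if c = '\r' then
        if rest.head? = some '\n' then (some '\n', (i, i + 2)) :: pvTokB rest.tail (i + 2)
        else (some '\n', (i, i + 1)) :: pvTokB rest (i + 1)
      else if c = '\n' then (some '\n', (i, i + 1)) :: pvTokB rest (i + 1)
      else if c = ' ' ∨ c = '\t' then (none, (i, i + 1)) :: pvTokB rest (i + 1)
      else (some c, (i, i + 1)) :: pvTokB rest (i + 1)
termination_by cs.length
decreasing_by all_goals simp [List.length_tail]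

-- Pass 2's lookahead test: keep a whitespace token before this next-token?
def pvKeepNext (t : Option (Option Char × Int × Int)) : Bool :=
  match t with
  | none => true
  | some (some c, _) => c ≠ '\n'
  | some (none, _) => false

-- Pass 2: emit, dropping whitespace tokens unless the lookahead keeps them.
def pvEmitB : List (Option Char × Int × Int) → List Char × List (Int × Int)
  | [] => ([], [])
  | (some c, sp) :: rest =>
      let r := pvEmitB rest
      (c :: r.1, sp :: r.2)
  | (none, sp) :: rest =>
      let r := pvEmitB rest
      if pvKeepNext rest.head? then (' ' :: r.1, sp :: r.2) else r

def reversible_normalize_alt (s : String) : String × (List (Int × Int)) :=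
  let r := pvEmitB (pvTokB s.toList 0)
  (String.ofList r.1, r.2)

-- ===== PRECONDITION & SPEC =====
def Spec_reversible_normalize (s : String) (out : String × (List (Int × Int))) : Prop := out = reversible_normalize_alt s
instance (s : String) (out : String × (List (Int × Int))) : Decidable (Spec_reversible_normalize s out) := by unfold Spec_reversible_normalize; infer_instance

-- ===== CLAIM =====
def Claim_equal_reversible_normalize : Prop := ∀ (s : String), Dom_reversible_normalize s → Spec_reversible_normalize s (reversible_normalize s)

-- ===== LEMMAS AND PROOFS =====

-- Would a pending whitespace char just before cs be kept? ([] or ordinary head.)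
def pvKeep (cs : List Char) : Bool :=
  match cs with
  | [] => true
  | c :: _ => !(c = '\r' ∨ c = '\n' ∨ c = ' ' ∨ c = '\t')

lemma keepNext_tok (cs : List Char) (i : Int) :
    pvKeepNext (pvTokB cs i).head? = pvKeep cs := by
  cases cs with
  | nil => simp [pvTokB, pvKeepNext, pvKeep]
  | cons c rest =>
      rw [pvTokB]
      by_cases h1 : c = '\r'
      · by_cases h2 : rest.head? = some '\n' <;>
          simp [h1, h2, pvKeepNext, pvKeep]
      · by_cases h2 : c = '\n'
        · simp [h2, pvKeepNext, pvKeep]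
        · by_cases h3 : c = ' ' ∨ c = '\t'
          · have : ¬ c = '\r' := h1
            simp only [if_neg this, if_neg h2, if_pos h3, pvKeepNext, pvKeep]
            simp [h1, h2]
            tauto
          · have : ¬ c = '\r' := h1
            simp only [if_neg this, if_neg h2, if_neg h3, pvKeepNext, pvKeep]
            simp [h1, h2]
            tauto

-- A's buffer only ever holds whitespace, so the pop-loop empties it.
lemma pvPopA_ws : ∀ (b : List Char) (bs : List (Int × Int)),
    (∀ c ∈ b, c = ' ' ∨ c = '\t') → b.length = bs.length → pvPopA b bs = ([], []) := by
  intro b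
  induction b using List.reverseRecOn with
  | nil =>
      intro bs _ hlen
      have : bs = [] := by
        cases bs with
        | nil => rfl
        | cons x xs => simp at hlen
      subst this
      rw [pvPopA]
      simp
  | append_singleton xs x ih =>
      intro bs hws hlen
      have hx : x = ' ' ∨ x = '\t' := hws x (by simp)
      rw [pvPopA]
      rw [dif_pos (by rcases hx with h | h <;> simp [h])]
      have hbs : bs.dropLast.length = xs.length := by
        simp at hlen ⊢; omega
      have := ih bs.dropLast (fun c hc => hws c (by simp [hc]))
        (by simpa using hbs.symm)
      simpa using this

-- Main invariant: A's loop equals optional pending space + B's tokenize-then-emit.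
lemma pvGoA_eq_emit : ∀ (n : ℕ) (cs : List Char), cs.length ≤ n →
    ∀ (i : Int) (b : List Char) (bs : List (Int × Int)) (ls : Int × Int)
      (accC : List Char) (accS : List (Int × Int)),
    (∀ c ∈ b, c = ' ' ∨ c = '\t') → b.length = bs.length →
    (b ≠ [] → bs.getLast? = some ls) →
    pvGoA cs i b bs accC accS =
      (accC ++ (if b.isEmpty then [] else if pvKeep cs then [' '] else [])
            ++ (pvEmitB (pvTokB cs i)).1,
       accS ++ (if b.isEmpty then [] else if pvKeep cs then [ls] else [])
            ++ (pvEmitB (pvTokB cs i)).2) := by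
  intro n
  induction n with
  | zero =>
      intro cs hlen i b bs ls accC accS hws hl hlast
      have : cs = [] := List.eq_nil_iff_length_eq_zero.mpr (Nat.le_zero.mp hlen)
      subst this
      rw [pvGoA, pvTokB]
      cases b with
      | nil =>
          have : bs = [] := by cases bs with | nil => rfl | cons x xs => simp at hl
          subst this; simp [pvEmitB]
      | cons x xs =>
          have := hlast (by simp)
          simp [pvKeep, pvEmitB, List.getLastD_eq_getLast?, this]
  | succ n ih =>
      intro cs hlen i b bs ls accC accS hws hl hlast
      cases cs with
      | nil =>
          rw [pvGoA, pvTokB]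
          cases b with
          | nil =>
              have : bs = [] := by cases bs with | nil => rfl | cons x xs => simp at hl
              subst this; simp [pvEmitB]
          | cons x xs =>
              have := hlast (by simp)
              simp [pvKeep, pvEmitB, List.getLastD_eq_getLast?, this]
      | cons c rest =>
          have hpop := pvPopA_ws b bs hws hl
          have hrest : rest.length ≤ n := by simp at hlen; omega
          rw [pvGoA]
          by_cases h1 : c = '\r' ∧ rest.head? = some '\n'
          · have htok : pvTokB (c :: rest) i
                = (some '\n', (i, i + 2)) :: pvTokB rest.tail (i + 2) := by
              rw [pvTokB]; simp [h1.1, h1.2]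
            have hk : pvKeep (c :: rest) = false := by simp [pvKeep, h1.1]
            rw [if_pos h1, hpop, htok,
              ih rest.tail (le_trans (by simp [List.length_tail]) hrest)
                (i + 2) [] [] ls _ _ (by simp) rfl (by simp)]
            simp [pvEmitB, hk]
          · by_cases h2 : c = '\r' ∨ c = '\n'
            · have htok : pvTokB (c :: rest) i
                  = (some '\n', (i, i + 1)) :: pvTokB rest (i + 1) := by
                rw [pvTokB]
                rcases h2 with h | h
                · have hh : ¬ rest.head? = some '\n' := fun hc => h1 ⟨h, hc⟩
                  simp [h, hh]
                · have hr : c ≠ '\r' := by simp [h]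
                  simp [h, hr]
              have hk : pvKeep (c :: rest) = false := by
                rcases h2 with h | h <;> simp [pvKeep, h]
              rw [if_neg h1, if_pos h2, hpop, htok,
                ih rest hrest (i + 1) [] [] ls _ _ (by simp) rfl (by simp)]
              simp [pvEmitB, hk]
            · have hr : c ≠ '\r' := by rintro rfl; exact h2 (Or.inl rfl)
              have hn : c ≠ '\n' := by rintro rfl; exact h2 (Or.inr rfl)
              by_cases h3 : c = ' ' ∨ c = '\t'
              · have htok : pvTokB (c :: rest) i
                    = (none, (i, i + 1)) :: pvTokB rest (i + 1) := by
                  rw [pvTokB]; simp [hr, hn, h3]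
                have hk : pvKeep (c :: rest) = false := by
                  rcases h3 with h | h <;> simp [pvKeep, h]
                rw [if_neg h1, if_neg h2, if_pos h3, htok,
                  ih rest hrest (i + 1) (b ++ [c]) (bs ++ [(i, i + 1)]) (i, i + 1)
                    accC accS
                    (by intro d hd; rcases List.mem_append.mp hd with h | h
                        · exact hws d h
                        · simp at h; subst h; exact h3)
                    (by simp [hl]) (by simp)]
                simp only [pvEmitB, keepNext_tok, hk]
                by_cases hkr : pvKeep rest = true <;> simp [hkr] <;> cases b <;> simp
              · have htok : pvTokB (c :: rest) i
                    = (some c, (i, i + 1)) :: pvTokB rest (i + 1) := by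
                  rw [pvTokB]; simp [hr, hn, h3]
                have hk : pvKeep (c :: rest) = true := by
                  simp [pvKeep, hr, hn]
                  tauto
                rw [if_neg h1, if_neg h2, if_neg h3, htok,
                  ih rest hrest (i + 1) [] [] ls _ _ (by simp) rfl (by simp)]
                simp only [pvEmitB, hk]
                cases b with
                | nil => simp
                | cons x xs =>
                    have := hlast (by simp)
                    simp [List.getLastD_eq_getLast?, this]

-- ===== VERDICT =====
theorem reversible_normalize_spec : Claim_equal_reversible_normalize := by
  intro s _
  unfold Spec_reversible_normalize reversible_normalize reversible_normalize_alt
  rw [pvGoA_eq_emit s.toList.length s.toList le_rfl 0 [] [] (0, 0) [] []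
    (by simp) rfl (by simp)]
  rfl
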